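-- pv_equiv track=rewrite | github.com/MarcoFeldhaus/Trolley | Controlling/controlling_skript_export_one_region.py | normalize_voucher_codes
-- ===== SOURCE A (Python) =====
-- def normalize_voucher_codes(raw_codes):
--     """
--     Macht aus _woo_vou_codes immer eine Liste einzelner Gutscheincodes.
--     Unterstützt String, Liste und verschiedene Trennzeichen.
--     """
--     if raw_codes is None:
--         return []
--
--     if isinstance(raw_codes, list):
--         return [str(code).strip() for code in raw_codes if str(code).strip()]
--
--     raw = str(raw_codes).strip()
--     if not raw:
--         return []
--
--     separators = ["\n", ",", "|", ";"]
--     codes = [raw]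
--
--     for sep in separators:
--         new_codes = []
--         for chunk in codes:
--             parts = chunk.split(sep)
--             new_codes.extend(parts)
--         codes = new_codes
--
--     return [code.strip() for code in codes if code.strip()]
-- ===== SOURCE B (Python) =====
-- def normalize_voucher_codes(raw_codes):
--     """Single character-scan tokenizer: one pass over the string splitting on
--     any of the four separator chars, instead of four sequential split passes."""
--     if raw_codes is None:
--         return []
--     if isinstance(raw_codes, list):
--         return [str(code).strip() for code in raw_codes if str(code).strip()]
--     raw = str(raw_codes).strip()
--     if not raw:
--         return []
--     out = []
--     buf = []
--     for ch in raw: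
--         if ch in "\n,|;":
--             tok = "".join(buf).strip()
--             if tok:
--                 out.append(tok)
--             buf = []
--         else:
--             buf.append(ch)
--     tok = "".join(buf).strip()
--     if tok:
--         out.append(tok)
--     return out
-- ===== Notes on version B (the rewrite author's own statement) =====
-- stated objective: alternative
-- what changed: Replaces the four sequential split-passes (each rebuilding the whole list of chunks) by a single character scan that accumulates a buffer and emits a stripped token whenever any separator character is seen.
import Mathlib
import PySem

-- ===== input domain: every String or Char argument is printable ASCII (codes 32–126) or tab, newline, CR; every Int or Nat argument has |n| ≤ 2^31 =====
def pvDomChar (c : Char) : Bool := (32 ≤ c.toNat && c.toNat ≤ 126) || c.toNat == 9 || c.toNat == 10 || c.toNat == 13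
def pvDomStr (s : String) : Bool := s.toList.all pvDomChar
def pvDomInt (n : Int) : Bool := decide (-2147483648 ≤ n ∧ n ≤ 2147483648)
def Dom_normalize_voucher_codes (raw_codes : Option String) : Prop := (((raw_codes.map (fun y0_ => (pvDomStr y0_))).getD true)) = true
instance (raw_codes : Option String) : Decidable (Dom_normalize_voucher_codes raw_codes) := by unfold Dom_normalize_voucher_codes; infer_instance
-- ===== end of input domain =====

-- B replaces A's four sequential split-passes by one character scan with a token buffer (alternative decomposition, same result).
-- (The Python list-branch of A is unreachable for the Optional[str] argument type and is not ported.)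

-- ===== PORT A =====
-- chunk.split(sep): exact for the nonempty literal separators used below (= PySem.Str.split? with the `some` unwrapped)
def pySplitOn (s sep : String) : List String :=
  (PySem.Chars.splitOn s.toList sep.toList).map String.ofList

def normalize_voucher_codes (raw_codes : Option String) : List String :=
  match raw_codes with
  | none => []
  | some rc =>
    let raw := PySem.Str.strip rc
    if raw = "" then []
    else
      let separators : List String := ["\n", ",", "|", ";"]
      let codes := separators.foldl
        (fun codes sep => codes.foldl (fun new_codes chunk => new_codes ++ pySplitOn chunk sep) []) [raw]
      codes.filterMap (fun code => if PySem.Str.strip code = "" then none else some (PySem.Str.strip code))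

-- ===== PORT B =====
-- `ch in "\n,|;"`: exact membership test for a single character
def sepChar (c : Char) : Bool := c == '\n' || c == ',' || c == '|' || c == ';'

-- the for-loop of Source B: buffer of non-separator chars; emit stripped token at each separator and at the end
def altLoop (buf : List Char) : List Char → List String
  | [] =>
    let tok := PySem.Str.strip (String.ofList buf)
    if tok = "" then [] else [tok]
  | ch :: cs =>
    if sepChar ch then
      let tok := PySem.Str.strip (String.ofList buf)
      (if tok = "" then [] else [tok]) ++ altLoop [] cs
    else altLoop (buf ++ [ch]) cs

def normalize_voucher_codes_alt (raw_codes : Option String) : List String :=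
  match raw_codes with
  | none => []
  | some rc =>
    let raw := PySem.Str.strip rc
    if raw = "" then [] else altLoop [] raw.toList

-- ===== PRECONDITION & SPEC =====
def Spec_normalize_voucher_codes (raw_codes : Option String) (out : List String) : Prop := out = normalize_voucher_codes_alt raw_codes
instance (raw_codes : Option String) (out : List String) : Decidable (Spec_normalize_voucher_codes raw_codes out) := by unfold Spec_normalize_voucher_codes; infer_instance

-- ===== CLAIM (what is proved, stated in full; the proofs are below) =====
def Claim_equal_normalize_voucher_codes : Prop := ∀ (raw_codes : Option String), Dom_normalize_voucher_codes raw_codes → Spec_normalize_voucher_codes raw_codes (normalize_voucher_codes raw_codes)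

-- ===== LEMMAS AND PROOFS =====

-- (first fragment, later fragments) of a list split at every char satisfying p
def splitMem (p : Char → Bool) : List Char → List Char × List (List Char)
  | [] => ([], [])
  | a :: s => let r := splitMem p s; if p a then ([], r.1 :: r.2) else (a :: r.1, r.2)

def splitMemL (p : Char → Bool) (s : List Char) : List (List Char) :=
  (splitMem p s).1 :: (splitMem p s).2

def cleanup (l : List (List Char)) : List String :=
  l.filterMap (fun cs => let t := PySem.Chars.strip cs; if t = [] then none else some (String.ofList t))

theorem strip_ofList (cs : List Char) :
    PySem.Str.strip (String.ofList cs) = String.ofList (PySem.Chars.strip cs) := by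
  have h := PySem.Str.toList_strip (String.ofList cs)
  rw [String.toList_ofList] at h
  calc PySem.Str.strip (String.ofList cs)
      = String.ofList ((PySem.Str.strip (String.ofList cs)).toList) := String.ofList_toList.symm
    _ = String.ofList (PySem.Chars.strip cs) := by rw [h]

theorem ofList_eq_empty_iff (cs : List Char) : String.ofList cs = "" ↔ cs = [] := by
  constructor
  · intro h
    have := congrArg String.toList h
    simpa using this
  · intro h; subst h; rfl

theorem splitOn_go_char (c : Char) :
    ∀ (fuel : Nat) (s cur : List Char) (acc : List (List Char)), s.length < fuel →
      PySem.Chars.splitOn.go [c] fuel s cur acc =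
        acc.reverse ++ (cur.reverse ++ (splitMem (fun a => a == c) s).1) :: (splitMem (fun a => a == c) s).2 := by
  intro fuel
  induction fuel with
  | zero => intro s cur acc h; omega
  | succ f ih =>
    intro s cur acc h
    cases s with
    | nil => simp [PySem.Chars.splitOn.go, splitMem]
    | cons a rest =>
      by_cases hac : a = c
      · subst hac
        rw [PySem.Chars.splitOn.go]
        simp only [List.isPrefixOf, BEq.refl, Bool.true_and, if_pos]
        rw [ih _ _ _ (by simpa using Nat.lt_of_succ_lt_succ h)]
        simp [splitMem]
      · rw [PySem.Chars.splitOn.go]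
        have hpre : [c].isPrefixOf (a :: rest) = false := by
          simp [List.isPrefixOf]
          exact fun h' => absurd h'.symm hac
        rw [hpre]
        simp only [Bool.false_eq_true, if_false]
        rw [ih _ _ _ (by simpa using Nat.lt_of_succ_lt_succ h)]
        have hpa : ((a == c) : Bool) = false := by simp [hac]
        simp [splitMem, hpa, List.append_assoc]

theorem splitOn_char (c : Char) (s : List Char) :
    PySem.Chars.splitOn s [c] = splitMemL (fun a => a == c) s := by
  unfold PySem.Chars.splitOn splitMemL
  rw [splitOn_go_char c (s.length + 1) s [] [] (by omega)]
  simp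

theorem splitMem_or (p q : Char → Bool) (s : List Char) :
    (splitMem q (splitMem p s).1).1 = (splitMem (fun a => p a || q a) s).1 ∧
    (splitMem q (splitMem p s).1).2 ++ ((splitMem p s).2).flatMap (splitMemL q)
      = (splitMem (fun a => p a || q a) s).2 := by
  induction s with
  | nil => simp [splitMem]
  | cons a s ih =>
    by_cases hp : p a
    · simp [splitMem, hp, splitMemL, ih.1, ih.2]
    · by_cases hq : q a
      · simp [splitMem, hp, hq, ih.1, ih.2]
      · simp [splitMem, hp, hq, ih.1, ih.2]

theorem splitMemL_or (p q : Char → Bool) (s : List Char) :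
    (splitMemL p s).flatMap (splitMemL q) = splitMemL (fun a => p a || q a) s := by
  obtain ⟨h1, h2⟩ := splitMem_or p q s
  unfold splitMemL at h2 ⊢
  simp only [List.flatMap_cons, List.cons_append]
  rw [h1, h2]

-- one split stage of A, moved from strings to char lists
theorem stage_eq (frs : List (List Char)) (c : Char) (sep : String) (hsep : sep.toList = [c]) :
    (frs.map String.ofList).flatMap (fun chunk => pySplitOn chunk sep)
      = (frs.flatMap (splitMemL (fun a => a == c))).map String.ofList := by
  rw [List.flatMap_map]
  rw [List.map_flatMap]
  apply List.flatMap_congr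
  · intro fr _
    simp [pySplitOn, hsep, String.toList_ofList, splitOn_char]

theorem cleanup_eq_filterMap (frs : List (List Char)) :
    (frs.map String.ofList).filterMap
        (fun code => if PySem.Str.strip code = "" then none else some (PySem.Str.strip code))
      = cleanup frs := by
  rw [List.filterMap_map]
  unfold cleanup
  apply List.filterMap_congr
  intro cs _
  simp only [Function.comp_apply, strip_ofList, ofList_eq_empty_iff]

theorem altLoop_eq (s : List Char) : ∀ buf : List Char,
    altLoop buf s = cleanup ((buf ++ (splitMem sepChar s).1) :: (splitMem sepChar s).2) := by
  induction s with
  | nil =>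
    intro buf
    simp [altLoop, splitMem, cleanup, List.filterMap_cons, strip_ofList]
    split <;> simp_all
  | cons ch cs ih =>
    intro buf
    by_cases hc : sepChar ch
    · rw [show altLoop buf (ch :: cs) = (if PySem.Str.strip (String.ofList buf) = "" then []
          else [PySem.Str.strip (String.ofList buf)]) ++ altLoop [] cs from by simp [altLoop, hc]]
      rw [ih []]
      simp only [splitMem, hc, if_pos]
      simp only [cleanup, List.filterMap_cons, strip_ofList, ofList_eq_empty_iff, List.append_nil,
        List.nil_append]
      split <;> simp_all
    · rw [show altLoop buf (ch :: cs) = altLoop (buf ++ [ch]) cs from by simp [altLoop, hc]]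
      rw [ih (buf ++ [ch])]
      simp [splitMem, hc, List.append_assoc]

theorem sepChar_eq :
    (fun a => (((a == '\n') || (a == ',')) || (a == '|')) || (a == ';')) = sepChar := by
  funext a
  simp [sepChar, Bool.or_assoc]

-- ===== VERDICT (by name: the statement is the Claim_ definition above) =====
theorem normalize_voucher_codes_spec : Claim_equal_normalize_voucher_codes := by
  intro raw_codes _
  unfold Spec_normalize_voucher_codes
  cases raw_codes with
  | none => rfl
  | some rc =>
    unfold normalize_voucher_codes normalize_voucher_codes_alt
    by_cases h : PySem.Str.strip rc = ""
    · simp [h]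
    · simp only [h, if_false]
      rw [altLoop_eq _ []]
      simp only [List.nil_append]
      rw [show ((splitMem sepChar (PySem.Str.strip rc).toList).1
            :: (splitMem sepChar (PySem.Str.strip rc).toList).2)
          = splitMemL sepChar (PySem.Str.strip rc).toList from rfl]
      set L := (PySem.Str.strip rc).toList with hL
      simp only [List.foldl_cons, List.foldl_nil, PySem.List.foldl_append_eq_flatMap,
        List.nil_append]
      rw [show PySem.Str.strip rc = String.ofList L from String.ofList_toList.symm]
      rw [show [String.ofList L] = ([L].map String.ofList) from rfl]
      rw [stage_eq _ '\n' "\n" rfl, stage_eq _ ',' "," rfl,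
        stage_eq _ '|' "|" rfl, stage_eq _ ';' ";" rfl]
      rw [cleanup_eq_filterMap]
      refine congrArg cleanup ?_
      simp only [List.flatMap_singleton]
      rw [splitMemL_or, splitMemL_or, splitMemL_or, sepChar_eq]
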